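-- pv_equiv track=rewrite | github.com/499602D2/tg-launchbot | tg-launchbot/launchbot.py | reconstruct_link_for_markdown
-- ===== SOURCE A (Python) =====
-- def reconstruct_link_for_markdown(link):
-- 	link_reconstruct, char_set = '', {')', '\\'}
-- 	for char in link:
-- 		if char in char_set:
-- 			link_reconstruct += f'\\{char}'
-- 		else:
-- 			link_reconstruct += char
--
-- 	return link_reconstruct
-- ===== SOURCE B (Python) =====
-- def reconstruct_link_for_markdown(link):
-- 	return link.replace('\\', '\\\\').replace(')', '\\)')
-- ===== Notes on version B (the rewrite author's own statement) =====
-- stated objective: idiomatic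
-- what changed: Replaces the char-by-char accumulation loop with two chained str.replace library calls (backslash escaped first, then close-paren).
import Mathlib
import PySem

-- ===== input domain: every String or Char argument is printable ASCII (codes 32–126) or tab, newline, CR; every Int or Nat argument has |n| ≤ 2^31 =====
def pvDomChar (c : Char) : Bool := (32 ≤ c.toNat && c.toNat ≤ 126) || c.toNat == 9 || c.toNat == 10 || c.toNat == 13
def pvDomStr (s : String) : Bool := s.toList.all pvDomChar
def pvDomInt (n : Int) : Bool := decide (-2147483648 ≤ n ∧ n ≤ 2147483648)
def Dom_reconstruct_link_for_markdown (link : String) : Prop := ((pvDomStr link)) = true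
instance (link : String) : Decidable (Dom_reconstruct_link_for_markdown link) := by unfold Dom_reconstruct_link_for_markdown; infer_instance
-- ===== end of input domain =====

-- B escapes ')' and '\' by two chained str.replace calls instead of A's char-by-char loop (idiomatic).

-- ===== PORT A =====
def reconstruct_link_for_markdown (link : String) : String :=
  -- link_reconstruct, char_set = '', {')', '\\'}
  let char_set : PySem.Set Char := PySem.Set.ofList [')', '\\']
  String.ofList (link.toList.foldl (fun acc c =>
    if char_set.contains c then acc ++ ['\\', c] else acc ++ [c]) [])

-- ===== PORT B =====
def reconstruct_link_for_markdown_alt (link : String) : String :=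
  PySem.Str.replace (PySem.Str.replace link "\\" "\\\\") ")" "\\)"

-- ===== PRECONDITION & SPEC =====
def Spec_reconstruct_link_for_markdown (link : String) (out : String) : Prop := out = reconstruct_link_for_markdown_alt link
instance (link : String) (out : String) : Decidable (Spec_reconstruct_link_for_markdown link out) := by unfold Spec_reconstruct_link_for_markdown; infer_instance

-- ===== CLAIM (what is proved, stated in full; the proofs are below) =====
def Claim_equal_reconstruct_link_for_markdown : Prop := ∀ (link : String), Dom_reconstruct_link_for_markdown link → Spec_reconstruct_link_for_markdown link (reconstruct_link_for_markdown link)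

-- ===== LEMMAS AND PROOFS =====

-- single-character-pattern str.replace is a per-character flatMap
theorem replace_go_single (o : Char) (n : List Char) (fuel : Nat) :
    ∀ (l acc : List Char), l.length ≤ fuel →
      PySem.Chars.replace.go [o] n fuel l acc
        = acc.reverse ++ l.flatMap (fun c => if c = o then n else [c]) := by
  induction fuel with
  | zero =>
    intro l acc h
    have : l = [] := List.eq_nil_of_length_eq_zero (Nat.le_zero.mp h)
    subst this
    simp [PySem.Chars.replace.go]
  | succ fuel ih =>
    intro l acc h
    cases l with
    | nil => simp [PySem.Chars.replace.go]
    | cons c t =>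
      simp only [PySem.Chars.replace.go]
      by_cases hc : o = c
      · subst hc
        have : List.isPrefixOf [o] (o :: t) = true := by
          simp [List.isPrefixOf]
        rw [if_pos this]
        rw [ih _ _ (by simpa using Nat.le_of_succ_le_succ h)]
        simp
      · have : List.isPrefixOf [o] (c :: t) = false := by
          simp [List.isPrefixOf, hc]
        rw [if_neg (by simp [this])]
        rw [ih _ _ (by simpa using Nat.le_of_succ_le_succ h)]
        simp [Ne.symm hc]

theorem replace_single (l : List Char) (o : Char) (n : List Char) :
    PySem.Chars.replace l [o] n = l.flatMap (fun c => if c = o then n else [c]) := by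
  simp [PySem.Chars.replace, replace_go_single o n l.length l [] le_rfl]

-- A's loop as a flatMap
theorem foldA (l acc : List Char) :
    l.foldl (fun acc c =>
        if (PySem.Set.ofList [')', '\\'] : PySem.Set Char).contains c
        then acc ++ ['\\', c] else acc ++ [c]) acc
      = acc ++ l.flatMap (fun c =>
          if (PySem.Set.ofList [')', '\\'] : PySem.Set Char).contains c
          then ['\\', c] else [c]) := by
  induction l generalizing acc with
  | nil => simp
  | cons c t ih =>
    simp only [List.foldl_cons, List.flatMap_cons]
    by_cases h : (PySem.Set.ofList [')', '\\'] : PySem.Set Char).contains c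
    · rw [if_pos h, if_pos h, ih]; simp
    · rw [if_neg h, if_neg h, ih]; simp

-- ===== VERDICT (by name: the statement is the Claim_ definition above) =====
theorem reconstruct_link_for_markdown_spec : Claim_equal_reconstruct_link_for_markdown := by
  intro link _
  unfold Spec_reconstruct_link_for_markdown reconstruct_link_for_markdown reconstruct_link_for_markdown_alt
  apply String.ext  -- compare toLists
  simp only [PySem.Str.toList_replace, String.toList_ofList]
  rw [foldA]
  have h1 : ("\\" : String).toList = ['\\'] := rfl
  have h2 : ("\\\\" : String).toList = ['\\', '\\'] := rfl
  have h3 : (")" : String).toList = [')'] := rfl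
  have h4 : ("\\)" : String).toList = ['\\', ')'] := rfl
  rw [h1, h2, h3, h4, replace_single, replace_single]
  rw [List.flatMap_assoc]
  simp only [List.nil_append]
  apply List.flatMap_congr  -- per-character agreement
  intro c _
  by_cases hb : c = '\\'
  · subst hb; decide
  · by_cases hp : c = ')'
    · subst hp; decide
    · simp [hb, hp, PySem.Set.contains]
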